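-- pv_equiv track=rewrite | github.com/jbscwy/orgMiner | git_store/my/orgMiner/org_model_mining/model_evalute.py | allow_events
-- ===== SOURCE A (Python) =====
-- def allow_events(om, event_log):
--     size = 0
--     for event in event_log[1:]:
--         for value in om.values():
--             if event[1] in value:
--                 size += 1
--                 continue
--     return size
-- ===== SOURCE B (Python) =====
-- def allow_events(om, event_log):
--     # Precompute: element -> number of value-lists that contain it; then one O(1) lookup per event.
--     hits = {}
--     for value in om.values():
--         for x in set(value):
--             hits[x] = hits.get(x, 0) + 1
--     size = 0
--     for event in event_log[1:]:
--         size += hits.get(event[1], 0)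
--     return size
-- ===== Notes on version B (the rewrite author's own statement) =====
-- stated objective: faster
-- what changed: Replaces A's inner scan of every om value-list per event with a dictionary (element -> number of value-lists containing it) built once, so each event costs one O(1) lookup.
-- outside the precondition, e.g. on allow_events({}, [[], ['x']]): A returns 0, B raises IndexError
import Mathlib
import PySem

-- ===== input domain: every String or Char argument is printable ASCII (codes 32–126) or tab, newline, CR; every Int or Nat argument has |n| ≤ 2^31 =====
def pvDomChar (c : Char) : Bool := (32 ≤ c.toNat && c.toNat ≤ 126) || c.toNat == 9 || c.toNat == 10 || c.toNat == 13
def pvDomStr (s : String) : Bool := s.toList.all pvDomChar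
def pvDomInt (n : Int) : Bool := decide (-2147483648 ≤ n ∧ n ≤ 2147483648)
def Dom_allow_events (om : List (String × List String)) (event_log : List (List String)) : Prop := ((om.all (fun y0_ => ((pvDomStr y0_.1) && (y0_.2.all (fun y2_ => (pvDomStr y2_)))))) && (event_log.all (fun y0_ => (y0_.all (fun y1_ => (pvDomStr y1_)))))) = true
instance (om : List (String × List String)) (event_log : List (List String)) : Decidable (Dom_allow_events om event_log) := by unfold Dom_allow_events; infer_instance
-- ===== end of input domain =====

-- B replaces A's per-event scan over all of om's value-lists by a precomputed
-- element→(#value-lists containing it) dictionary with one O(1) lookup per event (objective: faster).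


-- ===== PORT A =====
-- event[1] is total under Pre_ (every tail event has length ≥ 2): pyGetD's default is never used there.
def allow_events (om : List (String × List String)) (event_log : List (List String)) : Int :=
  (PySem.List.slice event_log (some 1) none).foldl
    (fun size event =>
      (PySem.Dict.ofList om).values.foldl
        (fun size value =>
          if PySem.List.pyGetD event 1 "" ∈ value then size + 1 else size)
        size)
    0

-- ===== PORT B =====
-- hits = {}; for value in om.values(): for x in set(value): hits[x] = hits.get(x, 0) + 1
def pvBuildHits (values : List (List String)) : PySem.Dict String Int :=
  values.foldl
    (fun d value => (PySem.Set.ofList value).foldl (fun d x => d.modify x 0 (· + 1)) d)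
    PySem.Dict.empty

def allow_events_alt (om : List (String × List String)) (event_log : List (List String)) : Int :=
  let hits := pvBuildHits (PySem.Dict.ofList om).values
  (PySem.List.slice event_log (some 1) none).foldl
    (fun size event => size + hits.getD (PySem.List.pyGetD event 1 "") 0)
    0

-- ===== PRECONDITION & SPEC =====
-- Pre_ excludes event logs whose tail contains an event of fewer than 2 fields: event[1] raises
-- IndexError there whenever om is nonempty, and B's single lookup pass raises there even for empty om.
def Pre_allow_events (om : List (String × List String)) (event_log : List (List String)) : Prop :=
  ∀ e ∈ event_log.drop 1, 2 ≤ e.length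
instance (om : List (String × List String)) (event_log : List (List String)) : Decidable (Pre_allow_events om event_log) := by unfold Pre_allow_events; infer_instance

def pvWitness_allow_events : (List (String × List String)) × List (List String) :=
  ([("a", ["x", "y"]), ("b", ["x"])], [["hdr"], ["e", "x"], ["e", "y"], ["e", "z"]])

def Spec_allow_events (om : List (String × List String)) (event_log : List (List String)) (out : Int) : Prop := out = allow_events_alt om event_log
instance (om : List (String × List String)) (event_log : List (List String)) (out : Int) : Decidable (Spec_allow_events om event_log out) := by unfold Spec_allow_events; infer_instance

-- ===== CLAIM (what is proved, stated in full; the proofs are below) =====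
def Claim_equal_allow_events : Prop := ∀ (om : List (String × List String)) (event_log : List (List String)), Dom_allow_events om event_log → Pre_allow_events om event_log → Spec_allow_events om event_log (allow_events om event_log)

-- ===== LEMMAS AND PROOFS =====

-- set(value).count x is 0/1 membership
theorem pv_count_ofList (v : List String) (x : String) :
    (PySem.Set.ofList v).count x = if x ∈ v then 1 else 0 := by
  by_cases h : x ∈ v
  · simp only [h, if_true]
    exact List.count_eq_one_of_mem (PySem.Set.nodup_ofList v)
      ((PySem.Set.mem_ofList v x).mpr h)
  · simp [h, List.count_eq_zero, PySem.Set.mem_ofList]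

-- B's dictionary counts, for each element, the value-lists containing it
theorem pv_buildHits_getD (values : List (List String)) (x : String) :
    (pvBuildHits values).getD x 0 = (values.countP (fun v => decide (x ∈ v)) : Int) := by
  suffices h : ∀ (d : PySem.Dict String Int),
      (values.foldl
        (fun d value => (PySem.Set.ofList value).foldl (fun d x => d.modify x 0 (· + 1)) d)
        d).getD x 0 = d.getD x 0 + (values.countP (fun v => decide (x ∈ v)) : Int) by
    simpa [pvBuildHits, PySem.Dict.getD_empty] using h PySem.Dict.empty
  induction values with
  | nil => simp
  | cons v vs ih =>
    intro d
    rw [List.foldl_cons, ih, PySem.Dict.getD_foldl_modify_add_one, pv_count_ofList,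
      List.countP_cons]
    by_cases h : x ∈ v <;> simp [h]; ring

-- ===== VERDICT (by name: the statement is the Claim_ definition above) =====
theorem allow_events_spec : Claim_equal_allow_events := by
  intro om event_log _ _
  unfold Spec_allow_events allow_events
  dsimp only [allow_events_alt]
  apply PySem.List.foldl_congr_mem
  intro acc event _
  rw [PySem.List.foldl_ite_add_one, pv_buildHits_getD]
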